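-- pv_equiv track=rewrite | github.com/Ginnungagapet/movie-club-manager-discord-bot | utils/parsers.py | clean_movie_title
-- ===== SOURCE A (Python) =====
-- def clean_movie_title(title: str) -> str:
--     """
--     Clean movie title by removing extra whitespace and formatting
--
--     Args:
--         title: Raw movie title
--
--     Returns:
--         Cleaned movie title
--     """
--     if not title:
--         return ""
--
--     # Remove extra whitespace
--     title = " ".join(title.split())
--
--     # Remove common prefixes/suffixes that might interfere
--     prefixes_to_remove = ["the ", "a ", "an "]
--
--     title_lower = title.lower()
--     for prefix in prefixes_to_remove:
--         if title_lower.startswith(prefix):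
--             # Only remove if it's not the entire title
--             if len(title) > len(prefix):
--                 remaining = title[len(prefix) :]
--                 # Capitalize first letter of remaining title
--                 title = remaining[0].upper() + remaining[1:] if remaining else title
--                 break
--
--     return title.strip()
-- ===== SOURCE B (Python) =====
-- def clean_movie_title(title: str) -> str:
--     words = title.split()
--     if len(words) >= 2 and words[0].lower() in {"the", "a", "an"}:
--         rest = " ".join(words[1:])
--         return rest[0].upper() + rest[1:]
--     return " ".join(words)
-- ===== Notes on version B (the rewrite author's own statement) =====
-- stated objective: idiomatic
-- what changed: B tokenizes the title into a word list with split() and decides via a first-token membership test in {'the','a','an'}, rejoining words[1:], instead of A's join-then-lowercase-then-prefix-scanning loop over ['the ', 'a ', 'an '] with slicing; no final strip needed.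
import Mathlib
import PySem

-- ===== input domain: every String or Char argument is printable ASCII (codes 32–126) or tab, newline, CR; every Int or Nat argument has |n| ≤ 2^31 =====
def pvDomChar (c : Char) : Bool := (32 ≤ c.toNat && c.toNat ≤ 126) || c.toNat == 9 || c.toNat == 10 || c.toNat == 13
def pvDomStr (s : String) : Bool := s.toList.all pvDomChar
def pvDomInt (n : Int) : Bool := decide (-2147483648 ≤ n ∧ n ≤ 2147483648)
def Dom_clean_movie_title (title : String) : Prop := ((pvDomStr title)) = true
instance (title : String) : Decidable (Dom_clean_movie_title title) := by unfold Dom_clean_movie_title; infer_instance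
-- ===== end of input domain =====

-- B replaces A's join-then-prefix-scan loop by tokenizing into words and testing the
-- first token's lowercase against {"the","a","an"} (idiomatic decomposition; same cost).


-- ===== PORT A =====
-- the for-loop over prefixes_to_remove, with its break (state: the current `title`)
def cmtALoop (title titleLower : List Char) : List (List Char) → List Char
  | [] => title
  | p :: ps =>
    if PySem.Chars.startswith titleLower p then
      -- Only remove if it's not the entire title
      if title.length > p.length then
        -- remaining = title[len(prefix):]; title = remaining[0].upper() + remaining[1:] if remaining else title; break
        match PySem.Chars.slice title (some (p.length : Int)) none with
        | [] => title
        | c :: rest => PySem.Chars.upperChar c :: rest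
      else cmtALoop title titleLower ps
    else cmtALoop title titleLower ps

def clean_movie_title (title : String) : String :=
  if title == "" then ""
  else
    -- title = " ".join(title.split())
    let t := PySem.Chars.join [' '] (PySem.Chars.split₀ title.toList)
    let titleLower := PySem.Chars.lower t
    String.mk (PySem.Chars.strip (cmtALoop t titleLower ["the ".toList, "a ".toList, "an ".toList]))

-- ===== PORT B =====
def clean_movie_title_alt (title : String) : String :=
  let words := PySem.Chars.split₀ title.toList
  match words with
  | w :: v :: vs =>
    if PySem.Chars.lower w ∈ ["the".toList, "a".toList, "an".toList] then
      match PySem.Chars.join [' '] (v :: vs) with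
      | [] => ""  -- unreachable: split() words are nonempty
      | c :: rest => String.mk (PySem.Chars.upperChar c :: rest)
    else String.mk (PySem.Chars.join [' '] (w :: v :: vs))
  | _ => String.mk (PySem.Chars.join [' '] words)

-- ===== PRECONDITION & SPEC =====
def Spec_clean_movie_title (title : String) (out : String) : Prop := out = clean_movie_title_alt title
instance (title : String) (out : String) : Decidable (Spec_clean_movie_title title out) := by unfold Spec_clean_movie_title; infer_instance

-- ===== CLAIM (what is proved, stated in full; the proofs are below) =====
def Claim_equal_clean_movie_title : Prop := ∀ (title : String), Dom_clean_movie_title title → Spec_clean_movie_title title (clean_movie_title title)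

-- ===== LEMMAS AND PROOFS =====

-- every word produced by split() is nonempty and contains no whitespace character
theorem split₀_go_words (s : List Char) : ∀ (cur : List Char) (acc : List (List Char)),
    (∀ c ∈ cur, PySem.Chars.isspace c = false) →
    (∀ w ∈ acc, w ≠ [] ∧ ∀ c ∈ w, PySem.Chars.isspace c = false) →
    ∀ w ∈ PySem.Chars.split₀.go s cur acc, w ≠ [] ∧ ∀ c ∈ w, PySem.Chars.isspace c = false := by
  induction s with
  | nil =>
    intro cur acc hcur hacc w hw
    by_cases h : cur.isEmpty = true <;>
      simp only [PySem.Chars.split₀.go, h, if_true, if_false, Bool.false_eq_true,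
        List.mem_reverse, List.mem_cons] at hw
    · exact hacc w hw
    · rcases hw with hw | hw
      · subst hw
        refine ⟨by simpa [List.isEmpty_iff] using h, ?_⟩
        intro c hc; exact hcur c (by simpa using hc)
      · exact hacc w hw
  | cons c rest ih =>
    intro cur acc hcur hacc w hw
    by_cases hs : PySem.Chars.isspace c = true
    · by_cases he : cur.isEmpty = true
      · simp only [PySem.Chars.split₀.go, hs, he, if_true] at hw
        exact ih [] acc (by simp) hacc w hw
      · simp only [PySem.Chars.split₀.go, hs, he, if_true, if_false, Bool.false_eq_true] at hw
        refine ih [] (cur.reverse :: acc) (by simp) ?_ w hw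
        intro v hv
        rcases List.mem_cons.mp hv with hv | hv
        · subst hv
          refine ⟨by simpa [List.isEmpty_iff] using he, ?_⟩
          intro d hd; exact hcur d (by simpa using hd)
        · exact hacc v hv
    · simp only [PySem.Chars.split₀.go, hs, if_false, Bool.false_eq_true] at hw
      refine ih (c :: cur) acc ?_ hacc w hw
      intro d hd
      rcases List.mem_cons.mp hd with hd | hd
      · subst hd; simpa using hs
      · exact hcur d hd

theorem split₀_words (s : List Char) :
    ∀ w ∈ PySem.Chars.split₀ s, w ≠ [] ∧ ∀ c ∈ w, PySem.Chars.isspace c = false :=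
  split₀_go_words s [] [] (by simp) (by simp)

theorem lowerChar_not_space {c : Char} (h : PySem.Chars.isspace c = false) :
    PySem.Chars.isspace (PySem.Chars.lowerChar c) = false := by
  unfold PySem.Chars.lowerChar
  split
  · rename_i hu
    have hb : 65 ≤ c.toNat ∧ c.toNat ≤ 90 := by
      unfold PySem.Chars.isupper at hu
      simp [Char.le_def, UInt32.le_iff_toNat_le] at hu
      exact hu
    have h1 : (Char.ofNat (c.toNat + 32)).toNat = c.toNat + 32 := by
      rw [Char.toNat_ofNat, if_pos (Or.inl (by omega))]
    unfold PySem.Chars.isspace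
    simp only [h1, Bool.or_eq_false_iff, Bool.and_eq_false_iff, decide_eq_false_iff_not]
    omega
  · exact h

theorem upperChar_not_space {c : Char} (h : PySem.Chars.isspace c = false) :
    PySem.Chars.isspace (PySem.Chars.upperChar c) = false := by
  unfold PySem.Chars.upperChar
  split
  · rename_i hl
    have hb : 97 ≤ c.toNat ∧ c.toNat ≤ 122 := by
      unfold PySem.Chars.islower at hl
      simp [Char.le_def, UInt32.le_iff_toNat_le] at hl
      exact hl
    have h1 : (Char.ofNat (c.toNat - 32)).toNat = c.toNat - 32 := by
      rw [Char.toNat_ofNat, if_pos (Or.inl (by omega))]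
    unfold PySem.Chars.isspace
    simp only [h1, Bool.or_eq_false_iff, Bool.and_eq_false_iff, decide_eq_false_iff_not]
    omega
  · exact h

-- a prefix containing a space is never a prefix of a space-free string
theorem startswith_false_of_space (s p : List Char)
    (hs : ∀ c ∈ s, PySem.Chars.isspace c = false) (hp : ' ' ∈ p) :
    PySem.Chars.startswith s p = false := by
  by_contra h
  have h' : PySem.Chars.startswith s p = true := by
    cases hb : PySem.Chars.startswith s p
    · exact absurd hb h
    · rfl
  have hpre := (PySem.Chars.startswith_iff s p).mp h'
  have : (' ' : Char) ∈ s := hpre.subset hp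
  have := hs ' ' this
  simp [show PySem.Chars.isspace ' ' = true from by decide] at this

theorem join_ne_nil {v : List Char} (vs : List (List Char)) (hv : v ≠ []) :
    PySem.Chars.join [' '] (v :: vs) ≠ [] := by
  cases vs with
  | nil => simpa [PySem.Chars.join_singleton] using hv
  | cons u us =>
    rw [PySem.Chars.join_cons_cons]
    simp [hv]

theorem join_head? {v : List Char} (vs : List (List Char)) (hv : v ≠ []) :
    (PySem.Chars.join [' '] (v :: vs)).head? = v.head? := by
  cases vs with
  | nil => simp [PySem.Chars.join_singleton]
  | cons u us =>
    rw [PySem.Chars.join_cons_cons, List.append_assoc]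
    exact List.head?_append_of_ne_nil _ hv

theorem join_getLast? (v : List Char) (vs : List (List Char))
    (H : ∀ w ∈ v :: vs, w ≠ []) :
    ∃ a, (PySem.Chars.join [' '] (v :: vs)).getLast? = some a ∧ ∃ w ∈ v :: vs, a ∈ w := by
  induction vs generalizing v with
  | nil =>
    have hv : v ≠ [] := H v (by simp)
    obtain ⟨a, ha⟩ := Option.isSome_iff_exists.mp (List.getLast?_isSome.mpr hv)
    refine ⟨a, ?_, v, by simp, List.mem_of_getLast? ha⟩
    rw [PySem.Chars.join_singleton]
    exact ha
  | cons u us ih =>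
    obtain ⟨a, ha, w, hw, haw⟩ := ih u (fun w hw => H w (List.mem_cons_of_mem _ hw))
    have hne : PySem.Chars.join [' '] (u :: us) ≠ [] :=
      join_ne_nil us (H u (by simp))
    refine ⟨a, ?_, w, List.mem_cons_of_mem _ hw, haw⟩
    rw [PySem.Chars.join_cons_cons, List.getLast?_append_of_ne_nil _ hne]
    exact ha

theorem strip_eq_self_of_ends (cs : List Char)
    (hh : ∀ a, cs.head? = some a → PySem.Chars.isspace a = false)
    (hl : ∀ a, cs.getLast? = some a → PySem.Chars.isspace a = false) :
    PySem.Chars.strip cs = cs := by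
  unfold PySem.Chars.strip PySem.Chars.lstrip PySem.Chars.rstrip
  have h1 : List.dropWhile PySem.Chars.isspace cs = cs := by
    cases cs with
    | nil => rfl
    | cons c d => rw [List.dropWhile_cons_of_neg (by simp [hh c rfl])]
  rw [h1]
  cases hr : cs.reverse with
  | nil => simp [List.reverse_eq_nil_iff.mp hr]
  | cons c d =>
    have hc : cs.getLast? = some c := by
      rw [← List.head?_reverse, hr]; rfl
    rw [List.dropWhile_cons_of_neg (by simp [hl c hc]), ← hr, List.reverse_reverse]

-- " ".join of space-free nonempty words needs no strip
theorem strip_join (ws : List (List Char))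
    (H : ∀ w ∈ ws, w ≠ [] ∧ ∀ c ∈ w, PySem.Chars.isspace c = false) :
    PySem.Chars.strip (PySem.Chars.join [' '] ws) = PySem.Chars.join [' '] ws := by
  cases ws with
  | nil => rfl
  | cons v vs =>
    apply strip_eq_self_of_ends
    · intro a ha
      rw [join_head? vs (H v (by simp)).1] at ha
      exact (H v (by simp)).2 a (List.mem_of_mem_head? ha)
    · intro a ha
      obtain ⟨b, hb, w, hw, haw⟩ := join_getLast? v vs (fun w hw => (H w hw).1)
      rw [hb] at ha
      cases ha
      exact (H w hw).2 a haw

-- str.lower distributes over " ".join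
theorem lower_join (ws : List (List Char)) :
    PySem.Chars.lower (PySem.Chars.join [' '] ws) =
      PySem.Chars.join [' '] (ws.map PySem.Chars.lower) := by
  induction ws with
  | nil => rfl
  | cons v vs ih =>
    cases vs with
    | nil => simp [PySem.Chars.join_singleton, PySem.Chars.lower]
    | cons u us =>
      rw [PySem.Chars.join_cons_cons, List.map_cons]
      conv_rhs => rw [List.map_cons, PySem.Chars.join_cons_cons, ← List.map_cons]
      rw [← ih]
      simp [PySem.Chars.lower, show PySem.Chars.lowerChar ' ' = ' ' from by decide]

-- a space-terminated, space-free pattern is a prefix of (w ++ ' ' :: r) iff it equals w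
theorem prefix_word_iff (q : List Char) (hq : ∀ c ∈ q, PySem.Chars.isspace c = false) :
    ∀ (w : List Char), (∀ c ∈ w, PySem.Chars.isspace c = false) →
    ∀ r, ((q ++ [' ']) <+: (w ++ ' ' :: r)) ↔ q = w := by
  induction q with
  | nil =>
    intro w hw r
    cases w with
    | nil => simp
    | cons b w' =>
      simp only [List.nil_append, List.cons_append, List.cons_prefix_cons]
      constructor
      · rintro ⟨hb, -⟩
        have := hw b (by simp)
        rw [← hb] at this
        simp [show PySem.Chars.isspace ' ' = true from by decide] at this
      · intro h; simp at h
  | cons a q' ih =>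
    intro w hw r
    cases w with
    | nil =>
      simp only [List.nil_append, List.cons_append, List.cons_prefix_cons]
      constructor
      · rintro ⟨ha, -⟩
        have := hq a (by simp)
        rw [ha] at this
        simp [show PySem.Chars.isspace ' ' = true from by decide] at this
      · intro h; simp at h
    | cons b w' =>
      simp only [List.cons_append, List.cons_prefix_cons]
      rw [ih (fun c hc => hq c (List.mem_cons_of_mem _ hc)) w'
        (fun c hc => hw c (List.mem_cons_of_mem _ hc)) r]
      constructor
      · rintro ⟨h1, h2⟩; rw [h1, h2]
      · intro h; injection h with h1 h2; exact ⟨h1, h2⟩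

theorem drop_word (w r : List Char) (n : Nat) (h : n = w.length + 1) :
    List.drop n (w ++ ' ' :: r) = r := by
  subst h
  rw [show w ++ ' ' :: r = (w ++ [' ']) ++ r by simp,
    show w.length + 1 = (w ++ [' ']).length by simp, List.drop_left]

theorem strip_upper (v : List Char) (vs : List (List Char))
    (H : ∀ w ∈ v :: vs, w ≠ [] ∧ ∀ c ∈ w, PySem.Chars.isspace c = false)
    (c : Char) (rest : List Char) (hr : PySem.Chars.join [' '] (v :: vs) = c :: rest) :
    PySem.Chars.strip (PySem.Chars.upperChar c :: rest) = PySem.Chars.upperChar c :: rest := by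
  have hhead : (c :: rest).head? = v.head? := by rw [← hr]; exact join_head? vs (H v (by simp)).1
  have hcv : c ∈ v := List.mem_of_mem_head? (l := v) (by rw [← hhead]; rfl)
  have hc : PySem.Chars.isspace c = false := (H v (by simp)).2 c hcv
  apply strip_eq_self_of_ends
  · intro a ha
    have h' : PySem.Chars.upperChar c = a := by simpa using ha
    rw [← h']
    exact upperChar_not_space hc
  · intro a ha
    cases rest with
    | nil =>
      have h' : PySem.Chars.upperChar c = a := by simpa using ha
      rw [← h']
      exact upperChar_not_space hc
    | cons x xs =>
      rw [List.getLast?_cons_cons] at ha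
      obtain ⟨b, hb, w', hw', hbw⟩ := join_getLast? v vs (fun w hw => (H w hw).1)
      rw [hr, List.getLast?_cons_cons, ha] at hb
      have : a = b := by injection hb
      subst this
      exact (H w' hw').2 a hbw

set_option maxRecDepth 8192 in
theorem clean_movie_title_spec : Claim_equal_clean_movie_title := by
  intro title _hdom
  unfold Spec_clean_movie_title clean_movie_title clean_movie_title_alt
  by_cases h0 : title = ""
  · subst h0; decide
  · rw [if_neg (by simpa using h0)]
    have H := split₀_words title.toList
    cases hws : PySem.Chars.split₀ title.toList with
    | nil => decide
    | cons w ws' =>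
      rw [hws] at H
      have hw := H w (by simp)
      have hlw : ∀ c ∈ PySem.Chars.lower w, PySem.Chars.isspace c = false := by
        intro c hc
        obtain ⟨d, hd, rfl⟩ := List.mem_map.mp hc
        exact lowerChar_not_space (hw.2 d hd)
      cases ws' with
      | nil =>
        -- one word: no prefix matches, strip is a no-op, both sides return the word
        dsimp only
        rw [PySem.Chars.join_singleton]
        have hsf : ∀ p : List Char, ' ' ∈ p →
            PySem.Chars.startswith (PySem.Chars.lower w) p = false :=
          fun p hp => startswith_false_of_space _ p hlw hp
        simp only [cmtALoop, hsf "the ".toList (by simp), hsf "a ".toList (by simp),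
          hsf "an ".toList (by simp), Bool.false_eq_true, if_false]
        have := strip_join [w] (by intro x hx; simp at hx; subst hx; exact hw)
        rw [PySem.Chars.join_singleton] at this
        rw [this]
      | cons v vs =>
        dsimp only
        have hv := H v (by simp)
        have Hvvs : ∀ x ∈ v :: vs, x ≠ [] ∧ ∀ c ∈ x, PySem.Chars.isspace c = false :=
          fun x hx => H x (List.mem_cons_of_mem _ hx)
        have hrne : PySem.Chars.join [' '] (v :: vs) ≠ [] := join_ne_nil vs hv.1
        have hJ : PySem.Chars.join [' '] (w :: v :: vs) =
            w ++ ' ' :: PySem.Chars.join [' '] (v :: vs) := by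
          rw [PySem.Chars.join_cons_cons, List.append_assoc]; rfl
        have hL : PySem.Chars.lower (PySem.Chars.join [' '] (w :: v :: vs)) =
            PySem.Chars.lower w ++ ' ' ::
              PySem.Chars.join [' '] (List.map PySem.Chars.lower (v :: vs)) := by
          rw [lower_join]
          conv_rhs => rw [List.map_cons]
          rw [List.map_cons, List.map_cons, PySem.Chars.join_cons_cons, List.append_assoc]
          rfl
        have hsw : ∀ q : List Char, (∀ c ∈ q, PySem.Chars.isspace c = false) →
            (PySem.Chars.startswith
              (PySem.Chars.lower w ++ ' ' ::
                PySem.Chars.join [' '] (List.map PySem.Chars.lower (v :: vs)))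
              (q ++ [' ']) = true ↔ q = PySem.Chars.lower w) :=
          fun q hq => (PySem.Chars.startswith_iff _ _).trans
            (prefix_word_iff q hq (PySem.Chars.lower w) hlw _)
        have strue : ∀ q : List Char, (∀ c ∈ q, PySem.Chars.isspace c = false) →
            PySem.Chars.lower w = q →
            PySem.Chars.startswith
              (PySem.Chars.lower w ++ ' ' ::
                PySem.Chars.join [' '] (List.map PySem.Chars.lower (v :: vs)))
              (q ++ [' ']) = true :=
          fun q hq he => (hsw q hq).mpr he.symm
        have sfalse : ∀ q : List Char, (∀ c ∈ q, PySem.Chars.isspace c = false) →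
            PySem.Chars.lower w ≠ q →
            PySem.Chars.startswith
              (PySem.Chars.lower w ++ ' ' ::
                PySem.Chars.join [' '] (List.map PySem.Chars.lower (v :: vs)))
              (q ++ [' ']) = false := by
          intro q hq hne
          cases hb : PySem.Chars.startswith _ (q ++ [' ']) with
          | false => rfl
          | true => exact absurd ((hsw q hq).mp hb).symm hne
        have hlen : (PySem.Chars.lower w).length = w.length := List.length_map ..
        -- the matched branch, shared by the three articles
        have hmatch : ∀ q : List Char, PySem.Chars.lower w = q →
            (PySem.Chars.join [' '] (w :: v :: vs)).length > (q ++ [' ']).length ∧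
            PySem.Chars.slice (PySem.Chars.join [' '] (w :: v :: vs))
              (some (((q ++ [' ']).length : Nat) : Int)) none =
              PySem.Chars.join [' '] (v :: vs) := by
          intro q hq
          have hwq : w.length = q.length := by rw [← hlen, hq]
          constructor
          · rw [hJ]
            have := List.length_pos_of_ne_nil hrne
            simp [List.length_append, hwq]
            omega
          · rw [hJ, PySem.Chars.slice_eq_listSlice,
              PySem.List.slice_from _ (Int.natCast_nonneg _), Int.toNat_natCast]
            exact drop_word _ _ _ (by simp [hwq])
        obtain ⟨c, rest, hr⟩ : ∃ c rest, PySem.Chars.join [' '] (v :: vs) = c :: rest := by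
          cases hE : PySem.Chars.join [' '] (v :: vs) with
          | nil => exact absurd hE hrne
          | cons c rest => exact ⟨c, rest, rfl⟩
        have hstrip := strip_upper v vs Hvvs c rest hr
        by_cases hthe : PySem.Chars.lower w = "the".toList
        · obtain ⟨hgt, hslice⟩ := hmatch _ hthe
          rw [hL, show ("the " : String).toList = "the".toList ++ [' '] from rfl]
          simp only [cmtALoop]
          rw [strue "the".toList (by simp; decide) hthe]
          simp only [if_true]
          rw [if_pos hgt, hslice, hr,
            if_pos (show PySem.Chars.lower w ∈ ["the".toList, "a".toList, "an".toList] from by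
              simp [hthe])]
          simp [hstrip]
        · by_cases ha : PySem.Chars.lower w = "a".toList
          · obtain ⟨hgt, hslice⟩ := hmatch _ ha
            rw [hL, show ("the " : String).toList = "the".toList ++ [' '] from rfl,
              show ("a " : String).toList = "a".toList ++ [' '] from rfl]
            simp only [cmtALoop]
            rw [sfalse "the".toList (by simp; decide) hthe, strue "a".toList (by simp; decide) ha]
            simp only [Bool.false_eq_true, if_false]
            simp only [if_true]
            rw [if_pos hgt, hslice, hr,
              if_pos (show PySem.Chars.lower w ∈ ["the".toList, "a".toList, "an".toList] from by
                simp [ha])]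
            simp [hstrip]
          · by_cases han : PySem.Chars.lower w = "an".toList
            · obtain ⟨hgt, hslice⟩ := hmatch _ han
              rw [hL, show ("the " : String).toList = "the".toList ++ [' '] from rfl,
                show ("a " : String).toList = "a".toList ++ [' '] from rfl,
                show ("an " : String).toList = "an".toList ++ [' '] from rfl]
              simp only [cmtALoop]
              rw [sfalse "the".toList (by simp; decide) hthe, sfalse "a".toList (by simp; decide) ha,
                strue "an".toList (by simp; decide) han]
              simp only [Bool.false_eq_true, if_false]
              simp only [if_true]
              rw [if_pos hgt, hslice, hr,
                if_pos (show PySem.Chars.lower w ∈ ["the".toList, "a".toList, "an".toList] from by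
                  simp [han])]
              simp [hstrip]
            · -- no article: the loop leaves the title unchanged and strip is a no-op
              rw [hL, show ("the " : String).toList = "the".toList ++ [' '] from rfl,
                show ("a " : String).toList = "a".toList ++ [' '] from rfl,
                show ("an " : String).toList = "an".toList ++ [' '] from rfl]
              simp only [cmtALoop]
              rw [sfalse "the".toList (by simp; decide) hthe, sfalse "a".toList (by simp; decide) ha,
                sfalse "an".toList (by simp; decide) han]
              simp only [Bool.false_eq_true, if_false]
              rw [if_neg (show ¬ PySem.Chars.lower w ∈ ["the".toList, "a".toList, "an".toList]
                from by
                  simp only [List.mem_cons, List.not_mem_nil, or_false, not_or]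
                  exact ⟨hthe, ha, han⟩)]
              rw [strip_join _ H]
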